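-- pv_equiv track=rewrite | github.com/GreenwichandBarrow/Sapling | scripts/fireflies_sync.py | format_transcript_text
-- ===== SOURCE A (Python) =====
-- def format_transcript_text(sentences):
--     """Format sentences into readable transcript."""
--     if not sentences:
--         return "*No transcript available.*"
--
--     lines = []
--     current_speaker = None
--     for s in sentences:
--         speaker = s.get("speaker_name", "Unknown")
--         text = s.get("text", "").strip()
--         if not text:
--             continue
--         if speaker != current_speaker:
--             if lines:
--                 lines.append("")
--             lines.append(f"**{speaker}:** {text}")
--             current_speaker = speaker
--         else:
--             lines.append(text)
--
--     return "\n".join(lines)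
-- ===== SOURCE B (Python) =====
-- def format_transcript_text(sentences):
--     """Format sentences into readable transcript."""
--     if not sentences:
--         return "*No transcript available.*"
--
--     items = [(s.get("speaker_name", "Unknown"), s.get("text", "").strip())
--              for s in sentences]
--     items = [(sp, t) for sp, t in items if t]
--
--     blocks = []
--     i = 0
--     n = len(items)
--     while i < n:
--         sp, t = items[i]
--         j = i + 1
--         while j < n and items[j][0] == sp:
--             j += 1
--         blocks.append("\n".join([f"**{sp}:** {t}"] + [t2 for _, t2 in items[i + 1:j]]))
--         i = j
--
--     return "\n\n".join(blocks)
-- ===== Notes on version B (the rewrite author's own statement) =====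
-- stated objective: alternative
-- what changed: B replaces A's single stateful loop (tracking current_speaker and appending blank separators) by a pipeline: map sentences to (speaker, stripped text) pairs, drop empty texts, group consecutive same-speaker runs with a two-pointer scan, render one block per run and join the blocks with '\n\n'.
import Mathlib
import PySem

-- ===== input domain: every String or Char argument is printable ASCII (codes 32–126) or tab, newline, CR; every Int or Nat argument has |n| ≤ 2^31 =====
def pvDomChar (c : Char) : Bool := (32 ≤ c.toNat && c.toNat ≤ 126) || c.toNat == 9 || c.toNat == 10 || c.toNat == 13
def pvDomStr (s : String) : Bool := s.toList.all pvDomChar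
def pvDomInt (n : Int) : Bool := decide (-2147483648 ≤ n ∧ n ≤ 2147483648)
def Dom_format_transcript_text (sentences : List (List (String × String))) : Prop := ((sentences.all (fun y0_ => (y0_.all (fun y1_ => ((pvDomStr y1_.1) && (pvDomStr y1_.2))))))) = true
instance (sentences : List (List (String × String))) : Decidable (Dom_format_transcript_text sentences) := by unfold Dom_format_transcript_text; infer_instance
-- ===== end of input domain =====

-- B formats the transcript by grouping the non-empty sentences into consecutive
-- same-speaker runs (filter, then two-pointer run grouping, then one block per run)
-- instead of A's single stateful loop; objective: alternative decomposition, not faster.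

-- the f-string "**{speaker}:** {text}" (shared by both ports, as in both Pythons)
def pvHeader (speaker text : String) : String :=
  PySem.Str.join "" ["**", speaker, ":** ", text]

-- ===== PORT A =====
-- one iteration of A's for-loop; state = (lines, current_speaker)
def pvStepA (st : List String × Option String) (s : List (String × String)) :
    List String × Option String :=
  let speaker := PySem.Dict.getD ⟨s⟩ "speaker_name" "Unknown"
  let text := PySem.Str.strip (PySem.Dict.getD ⟨s⟩ "text" "")
  if text = "" then st
  else if some speaker ≠ st.2 then
    ((if st.1 = [] then st.1 else st.1 ++ [""]) ++ [pvHeader speaker text], some speaker)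
  else (st.1 ++ [text], st.2)

def format_transcript_text (sentences : List (List (String × String))) : String :=
  if sentences = [] then "*No transcript available.*"
  else PySem.Str.join "\n" (sentences.foldl pvStepA ([], none)).1

-- ===== PORT B =====
-- the per-sentence (speaker, stripped text) pair of B's first comprehension
def pvPair (s : List (String × String)) : String × String :=
  (PySem.Dict.getD ⟨s⟩ "speaker_name" "Unknown",
   PySem.Str.strip (PySem.Dict.getD ⟨s⟩ "text" ""))

-- B's inner while loop: collect the texts of the run of speaker `sp`, return (run texts, rest)
def pvTakeRun (sp : String) : List (String × String) → List String × List (String × String)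
  | [] => ([], [])
  | (sp2, t) :: rest =>
      if sp2 = sp then (t :: (pvTakeRun sp rest).1, (pvTakeRun sp rest).2)
      else ([], (sp2, t) :: rest)

theorem pvTakeRun_length (sp : String) (ps : List (String × String)) :
    (pvTakeRun sp ps).2.length ≤ ps.length := by
  induction ps with
  | nil => simp [pvTakeRun]
  | cons p rest ih =>
      obtain ⟨sp2, t⟩ := p
      simp only [pvTakeRun]
      split
      · exact le_trans ih (Nat.le_succ _)
      · simp

-- B's outer while loop: one joined block per consecutive same-speaker run
def pvBlocks : List (String × String) → List String
  | [] => []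
  | (sp, t) :: rest =>
      PySem.Str.join "\n" (pvHeader sp t :: (pvTakeRun sp rest).1)
        :: pvBlocks (pvTakeRun sp rest).2
  termination_by ps => ps.length
  decreasing_by
    have := pvTakeRun_length sp rest
    simp only [List.length_cons]
    omega

def format_transcript_text_alt (sentences : List (List (String × String))) : String :=
  if sentences = [] then "*No transcript available.*"
  else
    let items := (sentences.map pvPair).filter (fun p => !(p.2 == ""))
    PySem.Str.join "\n\n" (pvBlocks items)

-- ===== PRECONDITION & SPEC =====
def Spec_format_transcript_text (sentences : List (List (String × String))) (out : String) : Prop := out = format_transcript_text_alt sentences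
instance (sentences : List (List (String × String))) (out : String) : Decidable (Spec_format_transcript_text sentences out) := by unfold Spec_format_transcript_text; infer_instance

-- ===== CLAIM (what is proved, stated in full; the proofs are below) =====
def Claim_equal_format_transcript_text : Prop := ∀ (sentences : List (List (String × String))), Dom_format_transcript_text sentences → Spec_format_transcript_text sentences (format_transcript_text sentences)

-- ===== LEMMAS AND PROOFS =====

-- A's loop over pairs (after the skip of empty texts)
def pvStepP (st : List String × Option String) (p : String × String) :
    List String × Option String :=
  if some p.1 ≠ st.2 then
    ((if st.1 = [] then st.1 else st.1 ++ [""]) ++ [pvHeader p.1 p.2], some p.1)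
  else (st.1 ++ [p.2], st.2)

-- the lines A appends after the first header, given the current speaker
def pvBuild (cur : String) : List (String × String) → List String
  | [] => []
  | (sp, t) :: rest =>
      if sp = cur then t :: pvBuild cur rest
      else "" :: pvHeader sp t :: pvBuild sp rest

-- A's full line list
def pvToLines : List (String × String) → List String
  | [] => []
  | (sp, t) :: rest => pvHeader sp t :: pvBuild sp rest

theorem pvFoldA_eq_foldP (sentences : List (List (String × String)))
    (st : List String × Option String) :
    sentences.foldl pvStepA st =
      ((sentences.map pvPair).filter (fun p => !(p.2 == ""))).foldl pvStepP st := by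
  induction sentences generalizing st with
  | nil => rfl
  | cons s rest ih =>
      simp only [List.foldl_cons, List.map_cons, List.filter_cons]
      by_cases h : (pvPair s).2 = ""
      · have hA : pvStepA st s = st := by
          simp [pvStepA, pvPair] at h ⊢
          simp [h]
        simp [h, hA, ih]
      · have hA : pvStepA st s = pvStepP st (pvPair s) := by
          simp [pvStepA, pvStepP, pvPair] at h ⊢
          simp [h]
        simp [h, hA, ih]

theorem pvFoldP_some (ps : List (String × String)) :
    ∀ (lines : List String) (c : String), lines ≠ [] →
    (ps.foldl pvStepP (lines, some c)).1 = lines ++ pvBuild c ps := by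
  induction ps with
  | nil => intro lines c _; simp [pvBuild]
  | cons p rest ih =>
      intro lines c hne
      obtain ⟨sp, t⟩ := p
      by_cases h : sp = c
      · have hstep : pvStepP (lines, some c) (sp, t) = (lines ++ [t], some c) := by
          simp [pvStepP, h]
        simp only [List.foldl_cons]
        rw [hstep, ih (lines ++ [t]) c (by simp)]
        simp [pvBuild, h]
      · have hstep : pvStepP (lines, some c) (sp, t)
            = (lines ++ [""] ++ [pvHeader sp t], some sp) := by
          simp [pvStepP, h, hne]
        simp only [List.foldl_cons]
        rw [hstep, ih (lines ++ [""] ++ [pvHeader sp t]) sp (by simp)]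
        simp [pvBuild, h]

theorem pvFoldP_none (ps : List (String × String)) :
    (ps.foldl pvStepP ([], none)).1 = pvToLines ps := by
  cases ps with
  | nil => rfl
  | cons p rest =>
      obtain ⟨sp, t⟩ := p
      have hstep : pvStepP ([], none) (sp, t) = ([pvHeader sp t], some sp) := by
        simp [pvStepP]
      simp only [List.foldl_cons, hstep, pvToLines]
      rw [pvFoldP_some rest [pvHeader sp t] sp (by simp)]
      simp

-- pvBuild through the first run
theorem pvBuild_takeRun (ps : List (String × String)) : ∀ sp : String,
    pvBuild sp ps = (pvTakeRun sp ps).1 ++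
      (match (pvTakeRun sp ps).2 with
       | [] => []
       | (sp2, t2) :: r2 => "" :: pvHeader sp2 t2 :: pvBuild sp2 r2) := by
  induction ps with
  | nil => intro sp; simp [pvBuild, pvTakeRun]
  | cons p rest ih =>
      intro sp
      obtain ⟨sp2, t⟩ := p
      by_cases h : sp2 = sp
      · simp only [pvBuild, pvTakeRun, if_pos h]
        rw [ih sp]
        simp
      · simp [pvBuild, pvTakeRun, h]

-- generic intercalate facts (on lists of char lists)
theorem pvIc_cons_cons (sep x y : List Char) (l : List (List Char)) :
    List.intercalate sep (x :: y :: l) = x ++ sep ++ List.intercalate sep (y :: l) := by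
  simp [List.intercalate]

theorem pvIc_singleton (sep x : List Char) :
    List.intercalate sep [x] = x := by
  simp [List.intercalate]

theorem pvIc_append (sep : List Char) (as bs : List (List Char))
    (ha : as ≠ []) (hb : bs ≠ []) :
    List.intercalate sep (as ++ bs)
      = List.intercalate sep as ++ sep ++ List.intercalate sep bs := by
  induction as with
  | nil => exact absurd rfl ha
  | cons x xs ih =>
      cases xs with
      | nil =>
          cases bs with
          | nil => exact absurd rfl hb
          | cons b bs' =>
              rw [List.singleton_append, pvIc_cons_cons, pvIc_singleton]
      | cons y ys =>
          rw [pvIc_cons_cons,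
            show (x :: y :: ys) ++ bs = x :: y :: (ys ++ bs) from rfl,
            pvIc_cons_cons,
            show y :: (ys ++ bs) = (y :: ys) ++ bs from rfl, ih (by simp)]
          simp [List.append_assoc]

-- chars-level value of a joined string list
theorem pvJoin_toList (sep : String) (parts : List String) :
    (PySem.Str.join sep parts).toList
      = List.intercalate sep.toList (parts.map String.toList) := by
  rw [PySem.Str.toList_join]
  rfl

-- unfolding equations for pvBlocks
theorem pvBlocks_nil : pvBlocks [] = [] := by
  rw [pvBlocks]

theorem pvBlocks_cons (sp t : String) (rest : List (String × String)) :
    pvBlocks ((sp, t) :: rest)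
      = PySem.Str.join "\n" (pvHeader sp t :: (pvTakeRun sp rest).1)
        :: pvBlocks (pvTakeRun sp rest).2 := by
  rw [pvBlocks]

-- the key bridge: A's "\n"-joined lines = B's "\n\n"-joined blocks
theorem pvKey : ∀ (n : Nat) (ps : List (String × String)), ps.length ≤ n →
    PySem.Str.join "\n" (pvToLines ps) = PySem.Str.join "\n\n" (pvBlocks ps) := by
  intro n
  induction n with
  | zero =>
      intro ps h
      have hnil : ps = [] := List.eq_nil_of_length_eq_zero (Nat.le_zero.mp h)
      subst hnil
      rw [pvBlocks_nil]
      rfl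
  | succ n ih =>
      intro ps hlen
      cases ps with
      | nil =>
          rw [pvBlocks_nil]
          rfl
      | cons p rest =>
          obtain ⟨sp, t⟩ := p
          have hbuild := pvBuild_takeRun rest sp
          have hrlen : (pvTakeRun sp rest).2.length ≤ n := by
            have := pvTakeRun_length sp rest
            simp at hlen
            omega
          apply String.ext
          rw [pvJoin_toList, pvJoin_toList, pvBlocks_cons]
          cases hr : (pvTakeRun sp rest).2 with
          | nil =>
              rw [hr] at hbuild
              have hb : pvBuild sp rest = (pvTakeRun sp rest).1 := by
                simpa using hbuild
              rw [show pvToLines ((sp, t) :: rest)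
                    = pvHeader sp t :: (pvTakeRun sp rest).1 by
                  simp [pvToLines, hb]]
              rw [pvBlocks_nil, List.map_singleton, pvIc_singleton, pvJoin_toList]
          | cons q r2 =>
              obtain ⟨sp2, t2⟩ := q
              rw [hr] at hbuild
              rw [hr] at hrlen
              have hIH := ih ((sp2, t2) :: r2) hrlen
              have hIH' : List.intercalate "\n".toList
                    ((pvToLines ((sp2, t2) :: r2)).map String.toList)
                  = List.intercalate "\n\n".toList
                    ((pvBlocks ((sp2, t2) :: r2)).map String.toList) := by
                have := congrArg String.toList hIH
                rwa [pvJoin_toList, pvJoin_toList] at this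
              have hblocks2 : pvBlocks ((sp2, t2) :: r2) ≠ [] := by
                rw [pvBlocks_cons]
                simp
              have hsplit : (pvToLines ((sp, t) :: rest)).map String.toList
                  = ((pvHeader sp t :: (pvTakeRun sp rest).1).map String.toList)
                    ++ ("".toList :: (pvToLines ((sp2, t2) :: r2)).map String.toList) := by
                simp [pvToLines, hbuild]
              simp only [pvToLines, List.map_cons] at hIH'
              rw [hsplit,
                pvIc_append "\n".toList _ _ (by simp) (by simp),
                show pvToLines ((sp2, t2) :: r2)
                  = pvHeader sp2 t2 :: pvBuild sp2 r2 from rfl]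
              simp only [List.map_cons]
              rw [pvIc_cons_cons, hIH']
              rw [show ((PySem.Str.join "\n" (pvHeader sp t :: (pvTakeRun sp rest).1)).toList
                    :: (pvBlocks ((sp2, t2) :: r2)).map String.toList)
                  = [(PySem.Str.join "\n" (pvHeader sp t :: (pvTakeRun sp rest).1)).toList]
                    ++ (pvBlocks ((sp2, t2) :: r2)).map String.toList from rfl]
              rw [pvIc_append "\n\n".toList _ _ (by simp) (by simpa using hblocks2),
                pvIc_singleton, pvJoin_toList]
              simp [List.append_assoc]

-- ===== VERDICT (by name: the statement is the Claim_ definition above) =====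
theorem format_transcript_text_spec : Claim_equal_format_transcript_text := by
  intro sentences _
  unfold Spec_format_transcript_text format_transcript_text format_transcript_text_alt
  by_cases h : sentences = []
  · simp [h]
  · simp only [if_neg h]
    rw [pvFoldA_eq_foldP, pvFoldP_none]
    exact pvKey _ _ (Nat.le_refl _)
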